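-- pv_equiv track=rewrite | github.com/lischilpp/bachelor-thesis-phoneme-recognition-alignment | src/preprocessing/augmented_dataset_to_disk.py | sentences_to_phoneme_lists
-- ===== SOURCE A (Python) =====
-- def sentences_to_phoneme_lists(sentences, word_to_phonemes):
--     phon_list_sentences = []
--     for sentence in sentences:
--         words = sentence.split(' ')
--         # timit dictionary is incomplete: exclude untranslatable sentences
--         bad_sentence = False
--         for word in words:
--             if not word in word_to_phonemes:
--                 bad_sentence = True
--                 break
--         if bad_sentence:
--             continue
--         phon_list_sentence = sum([word_to_phonemes[word] for word in words], [])
--         phon_list_sentences.append(phon_list_sentence)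
--     return phon_list_sentences
-- ===== SOURCE B (Python) =====
-- def sentences_to_phoneme_lists(sentences, word_to_phonemes):
--     result = []
--     for sentence in sentences:
--         phonemes = []
--         try:
--             for word in sentence.split(' '):
--                 phonemes.extend(word_to_phonemes[word])
--         except KeyError:
--             continue
--         result.append(phonemes)
--     return result
-- ===== Notes on version B (the rewrite author's own statement) =====
-- stated objective: idiomatic
-- what changed: Replaces the LBYL membership-check loop plus a separate sum()-flatten pass with a single EAFP pass per sentence that extends a fresh list and skips the sentence on KeyError.
import Mathlib
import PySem

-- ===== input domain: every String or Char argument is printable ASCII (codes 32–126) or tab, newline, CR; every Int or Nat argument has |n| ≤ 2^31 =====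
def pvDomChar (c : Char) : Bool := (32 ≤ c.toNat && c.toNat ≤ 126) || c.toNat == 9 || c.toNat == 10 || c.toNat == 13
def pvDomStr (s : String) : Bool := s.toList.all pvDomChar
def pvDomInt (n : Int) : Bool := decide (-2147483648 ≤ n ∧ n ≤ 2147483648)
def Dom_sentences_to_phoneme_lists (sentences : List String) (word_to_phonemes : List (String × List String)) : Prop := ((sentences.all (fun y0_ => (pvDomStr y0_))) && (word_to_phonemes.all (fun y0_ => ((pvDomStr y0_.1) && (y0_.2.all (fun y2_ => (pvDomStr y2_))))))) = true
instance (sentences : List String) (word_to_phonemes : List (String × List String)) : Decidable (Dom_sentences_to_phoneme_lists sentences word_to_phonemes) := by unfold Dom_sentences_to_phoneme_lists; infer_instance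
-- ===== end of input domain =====

-- B replaces A's check-then-sum two-pass per sentence with a single accumulating pass that aborts the sentence on a missing word (idiomatic EAFP); return values proved equal.

-- ===== PORT A =====
def sentences_to_phoneme_lists (sentences : List String) (word_to_phonemes : List (String × List String)) : List (List String) :=
  let d := PySem.Dict.ofList word_to_phonemes
  sentences.foldl (fun phon_list_sentences sentence =>
    let words := (PySem.Str.split? sentence " ").getD []
    let bad_sentence := words.any (fun word => ! d.contains word)
    if bad_sentence then phon_list_sentences
    else phon_list_sentences ++ [(words.map (fun word => d.getD word [])).foldl (· ++ ·) []]) []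

-- ===== PORT B =====
-- the try-block over one sentence's words: some = built list, none = KeyError (sentence skipped)
def pvTranslate (d : PySem.Dict String (List String)) (words : List String) : Option (List String) :=
  words.foldl (fun acc word => acc.bind (fun ph => (d.get? word).map (fun v => ph ++ v))) (some [])

def sentences_to_phoneme_lists_alt (sentences : List String) (word_to_phonemes : List (String × List String)) : List (List String) :=
  let d := PySem.Dict.ofList word_to_phonemes
  sentences.foldl (fun result sentence =>
    match pvTranslate d ((PySem.Str.split? sentence " ").getD []) with
    | some phonemes => result ++ [phonemes]
    | none => result) []

-- ===== PRECONDITION & SPEC =====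
def Spec_sentences_to_phoneme_lists (sentences : List String) (word_to_phonemes : List (String × List String)) (out : List (List String)) : Prop := out = sentences_to_phoneme_lists_alt sentences word_to_phonemes
instance (sentences : List String) (word_to_phonemes : List (String × List String)) (out : List (List String)) : Decidable (Spec_sentences_to_phoneme_lists sentences word_to_phonemes out) := by unfold Spec_sentences_to_phoneme_lists; infer_instance

-- ===== CLAIM (what is proved, stated in full; the proofs are below) =====
def Claim_equal_sentences_to_phoneme_lists : Prop := ∀ (sentences : List String) (word_to_phonemes : List (String × List String)), Dom_sentences_to_phoneme_lists sentences word_to_phonemes → Spec_sentences_to_phoneme_lists sentences word_to_phonemes (sentences_to_phoneme_lists sentences word_to_phonemes)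

-- ===== LEMMAS AND PROOFS =====
theorem pvTranslate_none (d : PySem.Dict String (List String)) (words : List String) :
    words.foldl (fun acc word => acc.bind (fun ph => (d.get? word).map (fun v => ph ++ v))) none = none := by
  induction words with
  | nil => rfl
  | cons w ws ih => simpa using ih

theorem pvTranslate_eq (d : PySem.Dict String (List String)) (words : List String) : ∀ (ph : List String),
    words.foldl (fun acc word => acc.bind (fun ph => (d.get? word).map (fun v => ph ++ v))) (some ph) =
      if words.any (fun word => ! d.contains word) then none
      else some ((words.map (fun word => d.getD word [])).foldl (· ++ ·) ph) := by
  induction words with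
  | nil => intro ph; simp
  | cons w ws ih =>
    intro ph
    rcases h : d.get? w with _ | v
    · have hc : d.contains w = false := by
        rw [PySem.Dict.contains_eq_isSome_get?, h]; rfl
      simp [List.foldl_cons, h, pvTranslate_none, hc]
    · have hc : d.contains w = true := by
        rw [PySem.Dict.contains_eq_isSome_get?, h]; rfl
      have hg : d.getD w [] = v := by
        rw [PySem.Dict.getD_eq_get?_getD, h]; rfl
      simp [List.foldl_cons, h, hc, hg, ih]

theorem pvFoldlExt {α β : Type} (f g : β → α → β) (h : ∀ b a, f b a = g b a) (init : β) (l : List α) : l.foldl f init = l.foldl g init := by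
  induction l generalizing init with
  | nil => rfl
  | cons x xs ih => simp only [List.foldl_cons, h, ih]

-- ===== VERDICT (by name: the statement is the Claim_ definition above) =====
theorem sentences_to_phoneme_lists_spec : Claim_equal_sentences_to_phoneme_lists := by
  intro sentences word_to_phonemes _
  unfold Spec_sentences_to_phoneme_lists sentences_to_phoneme_lists sentences_to_phoneme_lists_alt
  refine (pvFoldlExt _ _ ?_ [] sentences).symm
  intro acc s
  unfold pvTranslate
  rw [pvTranslate_eq]
  by_cases h : ((PySem.Str.split? s " ").getD []).any (fun word => ! (PySem.Dict.ofList word_to_phonemes).contains word)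
  · simp [h]
  · simp [h]
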